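-- pv_equiv track=rewrite | github.com/abcdefg3381/transmission_chain_inference | Transmission Chain Inference.py | classifiedByPatient
-- ===== SOURCE A (Python) =====
-- def classifiedByPatient(patient_set, table_data):
--     patient_data_dict = {}
--     for patient_id in patient_set:
--         for i in range(len(table_data)):
--             if table_data[i][0] == patient_id:
--                 if patient_id not in patient_data_dict.keys():
--                     patient_data_dict[patient_id]=[table_data[i]]
--                 else:
--                     patient_data_dict[patient_id].append(table_data[i])
--     return patient_data_dict
-- ===== SOURCE B (Python) =====
-- def classifiedByPatient(patient_set, table_data):
--     groups = {}
--     for row in table_data: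
--         if row[0] in patient_set:
--             groups.setdefault(row[0], []).append(row)
--     return {pid: groups[pid] for pid in patient_set if pid in groups}
-- ===== Notes on version B (the rewrite author's own statement) =====
-- stated objective: faster
-- what changed: B replaces A's rescan of the whole table for every patient id by a single grouping pass over table_data keyed by row[0], then emits the groups in patient_set order.
-- outside the precondition, e.g. on classifiedByPatient(set(), [[]]): A returns {}, B raises IndexError
import Mathlib
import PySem

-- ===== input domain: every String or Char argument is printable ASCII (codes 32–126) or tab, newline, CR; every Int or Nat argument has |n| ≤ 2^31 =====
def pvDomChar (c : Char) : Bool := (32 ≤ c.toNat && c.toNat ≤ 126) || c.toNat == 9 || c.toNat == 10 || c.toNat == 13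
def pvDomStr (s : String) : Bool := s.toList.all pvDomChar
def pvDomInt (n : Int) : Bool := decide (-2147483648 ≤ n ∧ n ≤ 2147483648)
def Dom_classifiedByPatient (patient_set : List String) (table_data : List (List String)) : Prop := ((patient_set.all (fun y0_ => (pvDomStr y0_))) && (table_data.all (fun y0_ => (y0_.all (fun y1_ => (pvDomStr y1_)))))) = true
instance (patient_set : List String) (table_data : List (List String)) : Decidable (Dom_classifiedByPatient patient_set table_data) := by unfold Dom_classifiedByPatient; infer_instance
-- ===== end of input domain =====

-- B groups table_data in ONE pass by row[0] instead of rescanning the whole table for every patient id;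
-- key order then follows patient_set, as in A.

-- ===== PORT A =====
def classifiedByPatient (patient_set : List String) (table_data : List (List String)) : List (String × List (List String)) :=
  (patient_set.foldl (fun d pid =>
      table_data.foldl (fun d row =>
        if PySem.List.pyGet? row 0 = some pid then      -- table_data[i][0] == patient_id
          if d.contains pid = false then
            d.insert pid [row]
          else
            -- patient_data_dict[patient_id].append(...): pid is present here, so the [] default is unreachable
            d.insert pid (d.getD pid [] ++ [row])
        else d) d)
    PySem.Dict.empty).items

-- ===== PORT B =====
-- B's single grouping pass over table_data ('groups' in Source B)
def pvGroupsB (patient_set : List String) (table_data : List (List String)) : PySem.Dict String (List (List String)) :=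
  table_data.foldl (fun g row =>
      match PySem.List.pyGet? row 0 with               -- row[0]; none = IndexError, outside Pre_
      | some h => if patient_set.contains h then g.modify h [] (fun l => l ++ [row]) else g
      | none => g) PySem.Dict.empty

def classifiedByPatient_alt (patient_set : List String) (table_data : List (List String)) : List (String × List (List String)) :=
  (patient_set.foldl (fun r pid =>
      match (pvGroupsB patient_set table_data).get? pid with
      | some rows => r.insert pid rows
      | none => r) PySem.Dict.empty).items

-- ===== PRECONDITION & SPEC =====
-- Pre_ excludes table_data containing an empty row (B's single pass always indexes row[0] and raises
-- IndexError there; A raises too whenever patient_set is non-empty, and with an empty patient_set A never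
-- touches the rows and returns {}), and duplicate entries in patient_set (impossible for the Python set this
-- parameter is; on a duplicate-carrying list A would append the matching rows once per occurrence).
def Pre_classifiedByPatient (patient_set : List String) (table_data : List (List String)) : Prop :=
  (∀ row ∈ table_data, row ≠ []) ∧ patient_set.Nodup
instance (patient_set : List String) (table_data : List (List String)) : Decidable (Pre_classifiedByPatient patient_set table_data) := by unfold Pre_classifiedByPatient; infer_instance
def pvWitness_classifiedByPatient : List String × List (List String) :=
  (["a", "b"], [["a", "1"], ["c", "0"], ["a", "2"], ["b", "3"]])

def Spec_classifiedByPatient (patient_set : List String) (table_data : List (List String)) (out : List (String × List (List String))) : Prop := out = classifiedByPatient_alt patient_set table_data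
instance (patient_set : List String) (table_data : List (List String)) (out : List (String × List (List String))) : Decidable (Spec_classifiedByPatient patient_set table_data out) := by unfold Spec_classifiedByPatient; infer_instance

-- ===== CLAIM (what is proved, stated in full; the proofs are below) =====
def Claim_equal_classifiedByPatient : Prop := ∀ (patient_set : List String) (table_data : List (List String)), Dom_classifiedByPatient patient_set table_data → Pre_classifiedByPatient patient_set table_data → Spec_classifiedByPatient patient_set table_data (classifiedByPatient patient_set table_data)

-- ===== LEMMAS AND PROOFS =====

-- rows of td whose first entry is pid (the common value both loops accumulate for pid)
def pvMatches (td : List (List String)) (pid : String) : List (List String) :=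
  td.filter (fun row => PySem.List.pyGet? row 0 == some pid)

-- get? as contains + getD (used to read B's groups dictionary)
theorem pvGet?_eq_ite {κ ν : Type} [BEq κ] [LawfulBEq κ] (d : PySem.Dict κ ν) (k : κ) (d0 : ν) :
    d.get? k = if d.contains k = true then some (d.getD k d0) else none := by
  cases h : d.get? k with
  | none =>
    rw [if_neg]
    simp [(PySem.Dict.get?_eq_none_iff_contains d k).mp h]
  | some v =>
    have hc : d.contains k ≠ false := by
      intro hf
      exact (by simp [h] : d.get? k ≠ none) ((PySem.Dict.get?_eq_none_iff_contains d k).mpr hf)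
    rw [if_pos (by revert hc; cases d.contains k <;> simp)]
    rw [PySem.Dict.getD_of_get?_eq_some d d0 h]

-- A's inner scan of the table for one pid, characterised
theorem pvInnerA (td : List (List String)) (pid : String) (d : PySem.Dict String (List (List String))) :
    (td.foldl (fun d row =>
        if PySem.List.pyGet? row 0 = some pid then
          if d.contains pid = false then d.insert pid [row]
          else d.insert pid (d.getD pid [] ++ [row])
        else d) d)
    = if pvMatches td pid = [] then d else d.insert pid (d.getD pid [] ++ pvMatches td pid) := by
  induction td generalizing d with
  | nil => simp [pvMatches]
  | cons row rest ih =>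
    by_cases h : PySem.List.pyGet? row 0 = some pid
    · have hm : pvMatches (row :: rest) pid = row :: pvMatches rest pid := by
        simp [pvMatches, h]
      have hstep : (if (d.contains pid) = false then d.insert pid [row]
            else d.insert pid (d.getD pid [] ++ [row]))
          = d.insert pid (d.getD pid [] ++ [row]) := by
        cases hc : d.contains pid with
        | false => simp [PySem.Dict.getD_of_not_contains d _ hc]
        | true => simp
      simp only [List.foldl_cons, if_pos h, hstep, hm, ih]
      by_cases hm' : pvMatches rest pid = []
      · simp [hm']
      · rw [if_neg hm', if_neg (by simp), PySem.Dict.getD_insert_self,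
            PySem.Dict.insert_insert_self, List.append_assoc]
        rfl
    · have hm : pvMatches (row :: rest) pid = pvMatches rest pid := by
        simp [pvMatches, h]
      simp only [List.foldl_cons, if_neg h, hm, ih]

-- B's grouping pass: the value stored for an admitted pid …
theorem pvGroupsGetD (ps : List String) (td : List (List String)) (pid : String)
    (hpid : ps.contains pid = true) (g : PySem.Dict String (List (List String))) :
    (td.foldl (fun g row =>
        match PySem.List.pyGet? row 0 with
        | some h => if ps.contains h then g.modify h [] (fun l => l ++ [row]) else g
        | none => g) g).getD pid []
    = g.getD pid [] ++ pvMatches td pid := by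
  induction td generalizing g with
  | nil => simp [pvMatches]
  | cons row rest ih =>
    cases h : PySem.List.pyGet? row 0 with
    | none => simp only [List.foldl_cons, h, ih]; simp [pvMatches, h]
    | some hd =>
      by_cases he : hd = pid
      · rw [he] at h
        have hm : pvMatches (row :: rest) pid = row :: pvMatches rest pid := by
          simp [pvMatches, h]
        simp only [List.foldl_cons, h, if_pos hpid, ih, hm,
          PySem.Dict.getD_modify_self, List.append_assoc, List.cons_append, List.nil_append]
      · have hm : pvMatches (row :: rest) pid = pvMatches rest pid := by
          simp [pvMatches, h, he]
        by_cases hc : ps.contains hd = true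
        · simp only [List.foldl_cons, h, if_pos hc, ih, hm]
          rw [PySem.Dict.getD_modify_of_ne g [] _ (fun e => he e.symm)]
        · simp only [List.foldl_cons, h, if_neg hc, ih, hm]

-- … and whether that pid is present at all
theorem pvGroupsContains (ps : List String) (td : List (List String)) (pid : String)
    (g : PySem.Dict String (List (List String))) (hpid : ps.contains pid = true) :
    (td.foldl (fun g row =>
        match PySem.List.pyGet? row 0 with
        | some h => if ps.contains h then g.modify h [] (fun l => l ++ [row]) else g
        | none => g) g).contains pid
    = (g.contains pid || !(pvMatches td pid).isEmpty) := by
  induction td generalizing g with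
  | nil => simp [pvMatches]
  | cons row rest ih =>
    cases h : PySem.List.pyGet? row 0 with
    | none =>
      simp only [List.foldl_cons, h, ih]
      simp [pvMatches, h]
    | some hd =>
      by_cases he : hd = pid
      · rw [he] at h
        have hm : pvMatches (row :: rest) pid = row :: pvMatches rest pid := by
          simp [pvMatches, h]
        simp only [List.foldl_cons, h, if_pos hpid, ih, hm,
          PySem.Dict.contains_modify]
        simp
      · have hm : pvMatches (row :: rest) pid = pvMatches rest pid := by
          simp [pvMatches, h, he]
        by_cases hc : ps.contains hd = true
        · simp only [List.foldl_cons, h, if_pos hc, ih, hm, PySem.Dict.contains_modify]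
          rw [beq_eq_false_iff_ne.mpr (Ne.symm he), Bool.false_or]
        · simp only [List.foldl_cons, h, if_neg hc, ih, hm]

-- the two outer loops agree on a duplicate-free list whose pids are all fresh in d
theorem pvOuterEq (td : List (List String)) (ps : List String)
    (d : PySem.Dict String (List (List String)))
    (hnd : ps.Nodup) (hfresh : ∀ pid ∈ ps, d.get? pid = none) :
    ps.foldl (fun r pid => if pvMatches td pid = [] then r
        else r.insert pid (r.getD pid [] ++ pvMatches td pid)) d
    = ps.foldl (fun r pid => if pvMatches td pid = [] then r
        else r.insert pid (pvMatches td pid)) d := by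
  induction ps generalizing d with
  | nil => rfl
  | cons p rest ih =>
    have hnd' := hnd.of_cons
    have hpnotin : p ∉ rest := by
      simp only [List.nodup_cons] at hnd; exact hnd.1
    by_cases hm : pvMatches td p = []
    · simp only [List.foldl_cons, if_pos hm]
      exact ih d hnd' (fun q hq => hfresh q (List.mem_cons_of_mem _ hq))
    · have hd0 : d.getD p [] = [] :=
        PySem.Dict.getD_of_get?_eq_none d [] (hfresh p (List.mem_cons_self ..))
      simp only [List.foldl_cons, if_neg hm, hd0, List.nil_append]
      refine ih _ hnd' (fun q hq => ?_)
      rw [PySem.Dict.get?_insert_of_ne d _ (fun e => hpnotin (by rw [← e]; exact hq))]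
      exact hfresh q (List.mem_cons_of_mem _ hq)

-- ===== VERDICT (by name: the statement is the Claim_ definition above) =====
theorem classifiedByPatient_spec : Claim_equal_classifiedByPatient := by
  intro ps td _hdom hpre
  unfold Spec_classifiedByPatient classifiedByPatient classifiedByPatient_alt pvGroupsB
  obtain ⟨_hrows, hnd⟩ := hpre
  -- B's outer loop, with the groups dictionary read off
  have hB := PySem.List.foldl_congr_mem ps
      (fun r pid =>
        match (td.foldl (fun g row =>
            match PySem.List.pyGet? row 0 with
            | some h => if ps.contains h then g.modify h [] (fun l => l ++ [row]) else g
            | none => g) PySem.Dict.empty).get? pid with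
        | some rows => r.insert pid rows
        | none => r)
      (fun r pid => if pvMatches td pid = [] then r else r.insert pid (pvMatches td pid))
      PySem.Dict.empty
      (fun r pid hpid => by
        have hpc : ps.contains pid = true := by simpa using hpid
        beta_reduce
        rw [pvGet?_eq_ite _ pid ([] : List (List String)),
            pvGroupsContains ps td pid PySem.Dict.empty hpc,
            pvGroupsGetD ps td pid hpc PySem.Dict.empty]
        simp only [PySem.Dict.contains_empty, PySem.Dict.getD_empty, Bool.false_or,
          List.nil_append]
        by_cases hm : pvMatches td pid = [] <;> simp [hm])
  rw [hB]
  -- A's outer loop, with the inner scan characterised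
  rw [PySem.List.foldl_congr_mem ps _ (fun d pid => if pvMatches td pid = [] then d
      else d.insert pid (d.getD pid [] ++ pvMatches td pid)) PySem.Dict.empty
      (fun d pid _ => pvInnerA td pid d)]
  rw [pvOuterEq td ps PySem.Dict.empty hnd (fun q _ => PySem.Dict.get?_empty q)]
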